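-- pv_equiv track=rewrite | github.com/Entex/dnacode | dnacode.py | convert_dna_to_6bit
-- ===== SOURCE A (Python) =====
-- def convert_dna_to_6bit(dna_code):
--     message = ""
--     for dc in [dna_code[i:i+3] for i in range(0, len(dna_code), 3)]:
--         if dc == 'AAA': message += 'a'
--         elif dc == 'AAC': message += 'b'
--         elif dc == 'AAG': message += 'c'
--         elif dc == 'AAT': message += 'd'
--         elif dc == 'ACA': message += 'e'
--         elif dc == 'ACC': message += 'f'
--         elif dc == 'ACG': message += 'g'
--         elif dc == 'ACT': message += 'h'
--         elif dc == 'AGA': message += 'i'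
--         elif dc == 'AGC': message += 'j'
--         elif dc == 'AGG': message += 'k'
--         elif dc == 'AGT': message += 'l'
--         elif dc == 'ATA': message += 'm'
--         elif dc == 'ATC': message += 'n'
--         elif dc == 'ATG': message += 'o'
--         elif dc == 'ATT': message += 'p'
--         elif dc == 'CAA': message += 'q'
--         elif dc == 'CAC': message += 'r'
--         elif dc == 'CAG': message += 's'
--         elif dc == 'CAT': message += 't'
--         elif dc == 'CCA': message += 'u'
--         elif dc == 'CCC': message += 'v'
--         elif dc == 'CCG': message += 'w'
--         elif dc == 'CCT': message += 'x'
--         elif dc == 'CGA': message += 'y'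
--         elif dc == 'CGC': message += 'z'
--         elif dc == 'CGG': message += 'A'
--         elif dc == 'CGT': message += 'B'
--         elif dc == 'CTA': message += 'C'
--         elif dc == 'CTC': message += 'D'
--         elif dc == 'CTG': message += 'E'
--         elif dc == 'CTT': message += 'F'
--         elif dc == 'GAA': message += 'G'
--         elif dc == 'GAC': message += 'H'
--         elif dc == 'GAG': message += 'I'
--         elif dc == 'GAT': message += 'J'
--         elif dc == 'GCA': message += 'K'
--         elif dc == 'GCC': message += 'L'
--         elif dc == 'GCG': message += 'M'
--         elif dc == 'GCT': message += 'N'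
--         elif dc == 'GGA': message += 'O'
--         elif dc == 'GGC': message += 'P'
--         elif dc == 'GGG': message += 'Q'
--         elif dc == 'GGT': message += 'R'
--         elif dc == 'GTA': message += 'S'
--         elif dc == 'GTC': message += 'T'
--         elif dc == 'GTG': message += 'U'
--         elif dc == 'GTT': message += 'V'
--         elif dc == 'TAA': message += 'W'
--         elif dc == 'TAC': message += 'X'
--         elif dc == 'TAG': message += 'Y'
--         elif dc == 'TAT': message += 'Z'
--         elif dc == 'TCA': message += '1'
--         elif dc == 'TCC': message += '2'
--         elif dc == 'TCG': message += '3'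
--         elif dc == 'TCT': message += '4'
--         elif dc == 'TGA': message += '5'
--         elif dc == 'TGC': message += '6'
--         elif dc == 'TGG': message += '7'
--         elif dc == 'TGT': message += '8'
--         elif dc == 'TTA': message += '9'
--         elif dc == 'TTC': message += '0'
--         elif dc == 'TTG': message += ' '
--         elif dc == 'TTT': message += '.'
--     return message
-- ===== SOURCE B (Python) =====
-- def convert_dna_to_6bit(dna_code):
--     vals = {'A': 0, 'C': 1, 'G': 2, 'T': 3}
--     charset = "abcdefghijklmnopqrstuvwxyzABCDEFGHIJKLMNOPQRSTUVWXYZ1234567890 ."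
--     out = []
--     for i in range(0, len(dna_code), 3):
--         dc = dna_code[i:i+3]
--         if len(dc) == 3 and all(ch in vals for ch in dc):
--             out.append(charset[16 * vals[dc[0]] + 4 * vals[dc[1]] + vals[dc[2]]])
--     return ''.join(out)
-- ===== Notes on version B (the rewrite author's own statement) =====
-- stated objective: idiomatic
-- what changed: Replaces the 64-branch if/elif comparison chain with a base-4 arithmetic index (16*v0+4*v1+v2 from a 4-entry base-value map) into a precomputed 64-character table.
import Mathlib
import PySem

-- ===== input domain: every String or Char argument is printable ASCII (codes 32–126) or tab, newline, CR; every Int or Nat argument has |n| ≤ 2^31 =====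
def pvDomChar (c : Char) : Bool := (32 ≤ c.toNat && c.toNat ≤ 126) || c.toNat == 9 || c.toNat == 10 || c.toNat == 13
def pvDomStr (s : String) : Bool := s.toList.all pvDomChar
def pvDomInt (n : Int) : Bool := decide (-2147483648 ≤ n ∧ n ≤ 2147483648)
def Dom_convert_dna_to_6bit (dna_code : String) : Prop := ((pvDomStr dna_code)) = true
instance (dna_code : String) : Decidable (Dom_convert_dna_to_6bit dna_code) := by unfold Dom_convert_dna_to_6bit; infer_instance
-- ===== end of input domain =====

-- B replaces A's 64-branch if/elif chain by a base-4 arithmetic index into a 64-char table (idiomatic; same cost).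

-- ===== PORT A =====
-- the body of A's loop: the 64-way comparison chain, appending nothing when no branch fires
def pvStepA (dc : List Char) : String :=
  if dc = "AAA".toList then "a"
  else if dc = "AAC".toList then "b"
  else if dc = "AAG".toList then "c"
  else if dc = "AAT".toList then "d"
  else if dc = "ACA".toList then "e"
  else if dc = "ACC".toList then "f"
  else if dc = "ACG".toList then "g"
  else if dc = "ACT".toList then "h"
  else if dc = "AGA".toList then "i"
  else if dc = "AGC".toList then "j"
  else if dc = "AGG".toList then "k"
  else if dc = "AGT".toList then "l"
  else if dc = "ATA".toList then "m"
  else if dc = "ATC".toList then "n"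
  else if dc = "ATG".toList then "o"
  else if dc = "ATT".toList then "p"
  else if dc = "CAA".toList then "q"
  else if dc = "CAC".toList then "r"
  else if dc = "CAG".toList then "s"
  else if dc = "CAT".toList then "t"
  else if dc = "CCA".toList then "u"
  else if dc = "CCC".toList then "v"
  else if dc = "CCG".toList then "w"
  else if dc = "CCT".toList then "x"
  else if dc = "CGA".toList then "y"
  else if dc = "CGC".toList then "z"
  else if dc = "CGG".toList then "A"
  else if dc = "CGT".toList then "B"
  else if dc = "CTA".toList then "C"
  else if dc = "CTC".toList then "D"
  else if dc = "CTG".toList then "E"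
  else if dc = "CTT".toList then "F"
  else if dc = "GAA".toList then "G"
  else if dc = "GAC".toList then "H"
  else if dc = "GAG".toList then "I"
  else if dc = "GAT".toList then "J"
  else if dc = "GCA".toList then "K"
  else if dc = "GCC".toList then "L"
  else if dc = "GCG".toList then "M"
  else if dc = "GCT".toList then "N"
  else if dc = "GGA".toList then "O"
  else if dc = "GGC".toList then "P"
  else if dc = "GGG".toList then "Q"
  else if dc = "GGT".toList then "R"
  else if dc = "GTA".toList then "S"
  else if dc = "GTC".toList then "T"
  else if dc = "GTG".toList then "U"
  else if dc = "GTT".toList then "V"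
  else if dc = "TAA".toList then "W"
  else if dc = "TAC".toList then "X"
  else if dc = "TAG".toList then "Y"
  else if dc = "TAT".toList then "Z"
  else if dc = "TCA".toList then "1"
  else if dc = "TCC".toList then "2"
  else if dc = "TCG".toList then "3"
  else if dc = "TCT".toList then "4"
  else if dc = "TGA".toList then "5"
  else if dc = "TGC".toList then "6"
  else if dc = "TGG".toList then "7"
  else if dc = "TGT".toList then "8"
  else if dc = "TTA".toList then "9"
  else if dc = "TTC".toList then "0"
  else if dc = "TTG".toList then " "
  else if dc = "TTT".toList then "."
  else ""

def convert_dna_to_6bit (dna_code : String) : String :=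
  let cs := dna_code.toList
  -- [dna_code[i:i+3] for i in range(0, len(dna_code), 3)]
  let chunks := (PySem.List.pyRange 0 (cs.length : Int) 3).map
    (fun i => PySem.List.slice cs (some i) (some (i + 3)))
  chunks.foldl (fun message dc => message ++ pvStepA dc) ""

-- ===== PORT B =====
def pvVal? (c : Char) : Option Nat :=
  if c = 'A' then some 0 else if c = 'C' then some 1
  else if c = 'G' then some 2 else if c = 'T' then some 3 else none

def pvCharset : List Char :=
  "abcdefghijklmnopqrstuvwxyzABCDEFGHIJKLMNOPQRSTUVWXYZ1234567890 .".toList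

-- B's loop body: length-3 chunk with all chars in the base map → table char, else nothing
def pvStepB (dc : List Char) : List Char :=
  match dc with
  | [c0, c1, c2] =>
    match pvVal? c0, pvVal? c1, pvVal? c2 with
    | some v0, some v1, some v2 => [pvCharset.getD (16 * v0 + 4 * v1 + v2) ' ']
    | _, _, _ => []
  | _ => []

def convert_dna_to_6bit_alt (dna_code : String) : String :=
  let cs := dna_code.toList
  String.ofList ((PySem.List.pyRange 0 (cs.length : Int) 3).foldl
    (fun out i => out ++ pvStepB (PySem.List.slice cs (some i) (some (i + 3)))) [])

-- ===== PRECONDITION & SPEC =====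
def Spec_convert_dna_to_6bit (dna_code : String) (out : String) : Prop := out = convert_dna_to_6bit_alt dna_code
instance (dna_code : String) (out : String) : Decidable (Spec_convert_dna_to_6bit dna_code out) := by unfold Spec_convert_dna_to_6bit; infer_instance

-- ===== CLAIM (what is proved, stated in full; the proofs are below) =====
def Claim_equal_convert_dna_to_6bit : Prop := ∀ (dna_code : String), Dom_convert_dna_to_6bit dna_code → Spec_convert_dna_to_6bit dna_code (convert_dna_to_6bit dna_code)

-- ===== LEMMAS AND PROOFS =====

theorem pvVal?_none {c : Char} (h : pvVal? c = none) :
    c ≠ 'A' ∧ c ≠ 'C' ∧ c ≠ 'G' ∧ c ≠ 'T' := by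
  unfold pvVal? at h; split_ifs at h <;> simp_all

theorem pvVal?_some {c : Char} {v : Nat} (h : pvVal? c = some v) :
    (c = 'A' ∧ v = 0) ∨ (c = 'C' ∧ v = 1) ∨ (c = 'G' ∧ v = 2) ∨ (c = 'T' ∧ v = 3) := by
  unfold pvVal? at h; split_ifs at h <;> simp_all

-- per-chunk agreement: A's comparison chain equals B's table lookup on every chunk
theorem pvStep_eq (dc : List Char) : pvStepA dc = String.ofList (pvStepB dc) := by
  match dc with
  | [] => decide
  | [c0] => simp [pvStepA, pvStepB]
  | [c0, c1] => simp [pvStepA, pvStepB]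
  | c0 :: c1 :: c2 :: c3 :: r => simp [pvStepA, pvStepB]
  | [c0, c1, c2] =>
    cases hv0 : pvVal? c0 with
    | none =>
      obtain ⟨n1, n2, n3, n4⟩ := pvVal?_none hv0
      simp [pvStepA, pvStepB, hv0, n1, n2, n3, n4]
    | some v0 =>
      cases hv1 : pvVal? c1 with
      | none =>
        obtain ⟨n1, n2, n3, n4⟩ := pvVal?_none hv1
        simp [pvStepA, pvStepB, hv0, hv1, n1, n2, n3, n4]
      | some v1 =>
        cases hv2 : pvVal? c2 with
        | none =>
          obtain ⟨n1, n2, n3, n4⟩ := pvVal?_none hv2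
          simp [pvStepA, pvStepB, hv0, hv1, hv2, n1, n2, n3, n4]
        | some v2 =>
          rcases pvVal?_some hv0 with ⟨rfl, rfl⟩ | ⟨rfl, rfl⟩ | ⟨rfl, rfl⟩ | ⟨rfl, rfl⟩ <;>
            rcases pvVal?_some hv1 with ⟨rfl, rfl⟩ | ⟨rfl, rfl⟩ | ⟨rfl, rfl⟩ | ⟨rfl, rfl⟩ <;>
            rcases pvVal?_some hv2 with ⟨rfl, rfl⟩ | ⟨rfl, rfl⟩ | ⟨rfl, rfl⟩ | ⟨rfl, rfl⟩ <;>
            decide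

-- folding A's chain over mapped chunks equals folding B's table step over the indices
theorem pvFold_eq (f : Int → List Char) (idxs : List Int) (acc : List Char) :
    ((idxs.map f).foldl (fun message dc => message ++ pvStepA dc) (String.ofList acc)) =
      String.ofList (idxs.foldl (fun out i => out ++ pvStepB (f i)) acc) := by
  induction idxs generalizing acc with
  | nil => rfl
  | cons i t ih =>
    simp only [List.map_cons, List.foldl_cons]
    rw [pvStep_eq, show String.ofList acc ++ String.ofList (pvStepB (f i)) =
          String.ofList (acc ++ pvStepB (f i)) by simp]
    exact ih (acc ++ pvStepB (f i))

-- ===== VERDICT (by name: the statement is the Claim_ definition above) =====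
theorem convert_dna_to_6bit_spec : Claim_equal_convert_dna_to_6bit := by
  intro s _
  unfold Spec_convert_dna_to_6bit convert_dna_to_6bit convert_dna_to_6bit_alt
  exact pvFold_eq _ _ []
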